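-- pv_equiv track=rewrite | github.com/Unknown1502/NeurIPS | utils/pattern_detection.py | is_symmetric_diagonal_anti
-- ===== SOURCE A (Python) =====
-- from typing import List, Tuple, Dict, Set
--
-- Grid = List[List[int]]
--
-- def get_dimensions(grid: Grid) -> Tuple[int, int]:
--     """Get grid dimensions."""
--     if not grid:
--         return (0, 0)
--     return (len(grid), len(grid[0]) if grid[0] else 0)
--
-- def is_symmetric_diagonal_anti(grid: Grid) -> bool:
--     """Check anti-diagonal symmetry."""
--     rows, cols = get_dimensions(grid)
--     if rows != cols:
--         return False
--
--     n = rows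
--     for i in range(n):
--         for j in range(n):
--             if grid[i][j] != grid[n-1-j][n-1-i]:
--                 return False
--     return True
-- ===== SOURCE B (Python) =====
-- def is_symmetric_diagonal_anti(grid):
--     """Anti-diagonal symmetry: a grid equals the 180-degree rotation of its transpose.
--
--     No dimension guard and no index arithmetic: zip(*grid) transposes, the outer and
--     inner reversals rotate it 180 degrees, and a shape mismatch (non-square grid)
--     simply makes the single equality comparison fail.
--     """
--     anti = [list(reversed(col)) for col in reversed(list(zip(*grid)))]
--     return grid == anti
-- ===== Notes on version B (the rewrite author's own statement) =====
-- stated objective: idiomatic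
-- what changed: Replaces the guarded short-circuiting double index loop with a single algebraic equality grid == rotate180(transpose(grid)) computed by zip(*grid) and two reversals, with no dimension guard and no index arithmetic (non-square shapes fail the equality by themselves).
-- outside the precondition, e.g. on is_symmetric_diagonal_anti([[1, 1], [1, 1, 5]]): A returns True, B returns False; on is_symmetric_diagonal_anti([[1, 2], [3]]): A raises IndexError, B returns False
import Mathlib
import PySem

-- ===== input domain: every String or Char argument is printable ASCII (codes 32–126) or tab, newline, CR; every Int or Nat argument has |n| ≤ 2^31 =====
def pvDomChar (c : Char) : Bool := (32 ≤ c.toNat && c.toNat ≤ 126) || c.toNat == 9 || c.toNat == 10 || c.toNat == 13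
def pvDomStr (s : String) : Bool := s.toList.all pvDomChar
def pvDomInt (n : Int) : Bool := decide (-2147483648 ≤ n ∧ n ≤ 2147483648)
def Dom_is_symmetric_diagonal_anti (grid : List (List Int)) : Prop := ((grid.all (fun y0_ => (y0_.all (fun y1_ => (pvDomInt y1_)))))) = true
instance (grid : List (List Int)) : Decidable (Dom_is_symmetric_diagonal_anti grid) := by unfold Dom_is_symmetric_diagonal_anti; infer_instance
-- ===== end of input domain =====

-- B checks grid == rotate180(transpose(grid)) built by zip(*grid) and two reversals,
-- with no dimension guard and no index arithmetic (objective: idiomatic).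

-- ===== PORT A =====
-- in-range double indexing grid[i][j] (A only reaches in-range indices inside Pre_)
def pvGet2 (grid : List (List Int)) (i j : Nat) : Int := (grid.getD i []).getD j 0

def get_dimensions (grid : List (List Int)) : Nat × Nat :=
  match grid with
  | [] => (0, 0)
  | r :: _ => (grid.length, if r.isEmpty then 0 else r.length)

def is_symmetric_diagonal_anti (grid : List (List Int)) : Bool :=
  let d := get_dimensions grid
  if d.1 ≠ d.2 then false
  else
    let n := d.1
    (List.range n).all (fun i =>
      (List.range n).all (fun j =>
        pvGet2 grid i j == pvGet2 grid (n - 1 - j) (n - 1 - i)))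

-- ===== PORT B =====
-- Python's zip(*rows): take heads while every row is nonempty (truncates at the shortest row).
def pyZipStar (rows : List (List Int)) : List (List Int) :=
  if rows = [] ∨ rows.any (·.isEmpty) then []
  else (rows.map (·.headD 0)) :: pyZipStar (rows.map (·.tail))
termination_by (rows.headD []).length
decreasing_by
  rename_i h
  rw [not_or] at h
  obtain ⟨h1, h2⟩ := h
  cases rows with
  | nil => exact absurd rfl h1
  | cons r t =>
    simp only [List.any_cons] at h2
    cases r with
    | nil => simp [List.isEmpty] at h2
    | cons a s => simp

def is_symmetric_diagonal_anti_alt (grid : List (List Int)) : Bool :=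
  let anti := ((pyZipStar grid).reverse).map List.reverse
  grid == anti

-- ===== PRECONDITION & SPEC =====
-- Pre_ excludes jagged grids that pass the rows==cols guard (some row length ≠ len(grid)):
-- there A may raise IndexError mid-scan or silently ignore the tail of an over-long row.
def Pre_is_symmetric_diagonal_anti (grid : List (List Int)) : Prop :=
  grid.length = (grid.headD []).length → ∀ row ∈ grid, row.length = grid.length
instance (grid : List (List Int)) : Decidable (Pre_is_symmetric_diagonal_anti grid) := by unfold Pre_is_symmetric_diagonal_anti; infer_instance

def pvWitness_is_symmetric_diagonal_anti : List (List Int) := [[1, 2], [3, 1]]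

def Spec_is_symmetric_diagonal_anti (grid : List (List Int)) (out : Bool) : Prop := out = is_symmetric_diagonal_anti_alt grid
instance (grid : List (List Int)) (out : Bool) : Decidable (Spec_is_symmetric_diagonal_anti grid out) := by unfold Spec_is_symmetric_diagonal_anti; infer_instance

-- ===== CLAIM (what is proved, stated in full; the proofs are below) =====
def Claim_equal_is_symmetric_diagonal_anti : Prop := ∀ (grid : List (List Int)), Dom_is_symmetric_diagonal_anti grid → Pre_is_symmetric_diagonal_anti grid → Spec_is_symmetric_diagonal_anti grid (is_symmetric_diagonal_anti grid)

-- ===== LEMMAS AND PROOFS =====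

lemma get_dimensions_snd (grid : List (List Int)) :
    (get_dimensions grid).2 = (grid.headD []).length := by
  cases grid with
  | nil => simp [get_dimensions]
  | cons r t => cases r <;> simp [get_dimensions]

lemma get_dimensions_fst (grid : List (List Int)) :
    (get_dimensions grid).1 = grid.length := by
  cases grid <;> simp [get_dimensions]

-- every row produced by pyZipStar has as many entries as the input has rows
lemma pyZipStar_row_len_fuel (fuel : Nat) : ∀ (rows : List (List Int)),
    (rows.headD []).length ≤ fuel → ∀ r ∈ pyZipStar rows, r.length = rows.length := by
  induction fuel with
  | zero =>
    intro rows hf r hr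
    rw [pyZipStar] at hr
    split at hr
    · exact absurd hr List.not_mem_nil
    · rename_i h
      rw [not_or] at h
      obtain ⟨h1, h2⟩ := h
      cases rows with
      | nil => exact absurd rfl h1
      | cons q t =>
        simp only [List.any_cons] at h2
        cases q with
        | nil => simp [List.isEmpty] at h2
        | cons a u => simp at hf
  | succ m ih =>
    intro rows hf r hr
    rw [pyZipStar] at hr
    split at hr
    · exact absurd hr List.not_mem_nil
    · rename_i h
      rw [not_or] at h
      obtain ⟨h1, h2⟩ := h
      rw [List.mem_cons] at hr
      rcases hr with rfl | hr
      · simp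
      · cases rows with
        | nil => exact absurd rfl h1
        | cons q t =>
          simp only [List.any_cons] at h2
          cases q with
          | nil => simp [List.isEmpty] at h2
          | cons a u =>
            have hfu : ((((a :: u) :: t).map (·.tail) : List (List Int)).headD []).length ≤ m := by
              simp at hf ⊢; omega
            have := ih _ hfu r hr
            simpa using this

lemma pyZipStar_row_len (rows : List (List Int)) :
    ∀ r ∈ pyZipStar rows, r.length = rows.length :=
  pyZipStar_row_len_fuel (rows.headD []).length rows le_rfl

-- on a nonempty rectangular matrix pyZipStar is the column-indexed transpose
lemma pyZipStar_rect (m : Nat) : ∀ (rows : List (List Int)), rows ≠ [] →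
    (∀ r ∈ rows, r.length = m) →
    pyZipStar rows = (List.range m).map (fun j => rows.map (fun r => r.getD j 0)) := by
  induction m with
  | zero =>
    intro rows hne hlen
    rw [pyZipStar, if_pos]
    · simp
    · right
      cases rows with
      | nil => exact absurd rfl hne
      | cons r t =>
        have := hlen r (List.mem_cons_self)
        simp [List.any_cons, List.eq_nil_of_length_eq_zero this]
  | succ m ih =>
    intro rows hne hlen
    have hnoempty : rows.any (·.isEmpty) = false := by
      rw [List.any_eq_false]
      intro r hr
      have := hlen r hr
      simp [List.isEmpty_iff]
      intro hnil; rw [hnil] at this; simp at this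
    rw [pyZipStar, if_neg (by simp [hnoempty, hne])]
    have htne : rows.map (·.tail) ≠ [] := by simpa using hne
    have htlen : ∀ r ∈ rows.map (·.tail), r.length = m := by
      intro r hr
      rw [List.mem_map] at hr
      obtain ⟨s, hs, rfl⟩ := hr
      have := hlen s hs
      simp [this]
    rw [ih _ htne htlen, List.range_succ_eq_map]
    simp only [List.map_cons, List.map_map]
    congr 1
    · apply List.map_congr_left
      intro r hr
      have := hlen r hr
      cases r with
      | nil => simp at this
      | cons a s => simp
    · apply List.map_congr_left
      intro j _
      apply List.map_congr_left
      intro r hr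
      have := hlen r hr
      cases r with
      | nil => simp at this
      | cons a s => simp [Function.comp]

-- if B's equality holds then the grid is square (rows == first-row length)
lemma alt_true_square (grid : List (List Int))
    (h : grid = ((pyZipStar grid).reverse).map List.reverse) :
    grid.length = (grid.headD []).length := by
  cases hg : grid with
  | nil => simp
  | cons r t =>
    have hmem : r ∈ ((pyZipStar grid).reverse).map List.reverse := by
      rw [← h, hg]; exact List.mem_cons_self
    rw [List.mem_map] at hmem
    obtain ⟨s, hs, rfl⟩ := hmem
    rw [List.mem_reverse] at hs
    have := pyZipStar_row_len grid s hs
    simp [hg] at this ⊢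
    omega

-- B on a square grid equals the explicit anti-diagonal reflection comparison
lemma alt_square (grid : List (List Int)) (hrow : ∀ row ∈ grid, row.length = grid.length)
    (hne : grid ≠ []) :
    ((pyZipStar grid).reverse).map List.reverse
      = (List.range grid.length).map (fun i =>
          (List.range grid.length).map (fun j =>
            pvGet2 grid (grid.length - 1 - j) (grid.length - 1 - i))) := by
  set n := grid.length with hn
  rw [pyZipStar_rect n grid hne hrow]
  apply List.ext_getElem
  · simp
  · intro i hi hi'
    have hin : i < n := by simpa using hi'
    rw [List.getElem_map, List.getElem_reverse, List.getElem_map, List.getElem_range,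
      List.getElem_map, List.getElem_range]
    apply List.ext_getElem
    · simp [hn]
    · intro j hj hj'
      have hjn : j < n := by simpa using hj'
      rw [List.getElem_reverse, List.getElem_map, List.getElem_map, List.getElem_range]
      have hgn : n - 1 - j < grid.length := by omega
      simp only [List.length_map, List.length_range, hn] at *
      simp [pvGet2, List.getD_eq_getElem?_getD, List.getElem?_eq_getElem hgn]

-- On a true n×n grid, A's all-pairs check coincides with the grid-vs-reflection equality.
lemma square_case (grid : List (List Int)) (hrow : ∀ row ∈ grid, row.length = grid.length) :
    ((List.range grid.length).all (fun i =>
      (List.range grid.length).all (fun j =>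
        pvGet2 grid i j == pvGet2 grid (grid.length - 1 - j) (grid.length - 1 - i))))
    = decide (grid = (List.range grid.length).map (fun i =>
        (List.range grid.length).map (fun j =>
          pvGet2 grid (grid.length - 1 - j) (grid.length - 1 - i)))) := by
  set n := grid.length with hn
  apply Bool.eq_iff_iff.mpr
  simp only [List.all_eq_true, List.mem_range, beq_iff_eq, decide_eq_true_eq]
  constructor
  · intro h
    apply List.ext_getElem
    · simp [hn]
    · intro i hi hi'
      have hi'' : i < n := by simpa using hi'
      apply List.ext_getElem
      · have := hrow grid[i] (List.getElem_mem hi)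
        simp [this, hn]
      · intro j hj hj'
        have hj'' : j < n := by simpa using hj'
        have := h i hi'' j hj''
        simpa [pvGet2, List.getD_eq_getElem?_getD, List.getElem?_eq_getElem, hi,
          List.getElem?_eq_getElem hj] using this
  · intro h i hi j hj
    have hgi : i < grid.length := by omega
    have := congrArg (fun L => (L.getD i []).getD j (0 : Int)) h
    simp only at this
    have hji : j < (grid[i]'hgi).length := by
      have := hrow grid[i] (List.getElem_mem hgi); omega
    calc pvGet2 grid i j = (grid.getD i []).getD j 0 := rfl
      _ = pvGet2 grid (n - 1 - j) (n - 1 - i) := by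
          rw [this]
          simp [List.getD_eq_getElem?_getD, hi, hj, pvGet2]

lemma main_lemma (grid : List (List Int)) (hp : Pre_is_symmetric_diagonal_anti grid) :
    is_symmetric_diagonal_anti grid = is_symmetric_diagonal_anti_alt grid := by
  unfold is_symmetric_diagonal_anti is_symmetric_diagonal_anti_alt
  simp only [get_dimensions_fst, get_dimensions_snd]
  rcases eq_or_ne grid.length (grid.headD []).length with hsq | hsq
  · rw [if_neg (not_not_intro hsq)]
    cases hg : grid with
    | nil => simp [pyZipStar]
    | cons r t =>
      rw [← hg]
      have hne : grid ≠ [] := by rw [hg]; exact List.cons_ne_nil r t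
      rw [alt_square grid (hp hsq) hne, square_case grid (hp hsq)]
      apply Bool.eq_iff_iff.mpr
      simp [beq_iff_eq]
  · rw [if_pos hsq]
    symm
    rw [beq_eq_false_iff_ne]
    intro hcontra
    exact hsq (alt_true_square grid hcontra)

-- ===== VERDICT (by name: the statement is the Claim_ definition above) =====
theorem is_symmetric_diagonal_anti_spec : Claim_equal_is_symmetric_diagonal_anti := by
  intro grid _ hp
  unfold Spec_is_symmetric_diagonal_anti
  exact main_lemma grid hp
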